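-- pv_equiv track=rewrite | github.com/likhitha-kopanathi/competitive-programming-2nd-year-elective- | 04-recursion_powersof3ton-Python/recursion_powersof3ton.py | recursion_powersof3ton
-- ===== SOURCE A (Python) =====
-- def recursion_powersof3ton(n, nextPower=0, newL = None):
-- 	# Your code goes here
-- 	if newL == None:
-- 		newL = []
-- 	if nextPower == 0:
-- 		newL.append(1)
-- 	if n < 1:
-- 		return None
-- 	else:
-- 		#every time we move on our power increments by 1
-- 		nextPower += 1
-- 		nextNumber = 3**nextPower
-- 		#if next number is greater than our number then we stop looping
-- 		if(nextNumber > n):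
-- 			return newL
-- 		newL.append(nextNumber)
-- 		return recursion_powersof3ton(n, nextPower, newL)
-- ===== SOURCE B (Python) =====
-- def recursion_powersof3ton(n, nextPower=0, newL=None):
--     if newL is None:
--         newL = []
--     if nextPower == 0:
--         newL.append(1)
--     if n < 1:
--         return None
--     # largest k with 3**k <= n (n >= 1, so k >= 0)
--     k, t = 0, 3
--     while t <= n:
--         k += 1
--         t *= 3
--     newL.extend(3 ** p for p in range(nextPower + 1, k + 1))
--     return newL
-- ===== Notes on version B (the rewrite author's own statement) =====
-- stated objective: alternative
-- what changed: Replaces the self-recursion (which re-runs the init/append-1 checks on every step) with a direct computation: find the largest exponent k with 3**k <= n by one multiplication loop, then extend the list with 3**p for p in range(nextPower+1, k+1).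
-- intended difference: For n >= 1 and nextPower == -1, A's recursive call re-enters with nextPower == 0 and unconditionally appends a second 1 (e.g. A returns [1, 1] for n=2), while B returns each power of 3 once ([1]); one power per exponent is the intended output. — e.g. on recursion_powersof3ton(2, -1, none): A returns some [1, 1], B returns some [1]
-- outside the precondition, e.g. on recursion_powersof3ton(1, -2, None): A returns [0.3333333333333333, 1, 1], B returns [0.3333333333333333, 1]
import Mathlib
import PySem

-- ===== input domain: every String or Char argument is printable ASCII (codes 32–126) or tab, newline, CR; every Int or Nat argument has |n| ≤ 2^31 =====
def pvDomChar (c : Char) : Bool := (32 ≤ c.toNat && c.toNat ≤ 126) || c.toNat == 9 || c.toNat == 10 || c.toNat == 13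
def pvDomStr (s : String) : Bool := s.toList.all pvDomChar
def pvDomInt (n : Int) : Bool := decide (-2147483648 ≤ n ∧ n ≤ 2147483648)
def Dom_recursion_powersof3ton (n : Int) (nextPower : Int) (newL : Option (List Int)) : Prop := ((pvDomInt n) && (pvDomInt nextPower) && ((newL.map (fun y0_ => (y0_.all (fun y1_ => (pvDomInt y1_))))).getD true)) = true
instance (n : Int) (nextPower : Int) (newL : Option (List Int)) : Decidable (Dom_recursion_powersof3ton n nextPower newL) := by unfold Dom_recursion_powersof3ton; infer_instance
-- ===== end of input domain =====

-- B replaces A's self-recursion by one loop finding the largest exponent k with 3^k ≤ n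
-- plus a single range comprehension; the equivalence is about the RETURN value only
-- (both Pythons mutate a caller-supplied newL list in place in the same way).

-- Python's 3 ** e for an Int exponent; exact for e ≥ 0 (inside Pre_ every exponent that
-- is actually raised is ≥ 0; for e < 0 Python yields a float, which Pre_ excludes).
def pvPow3 (e : Int) : Int := if e < 0 then 0 else 3 ^ e.toNat

theorem pvPow3_one_le {e : Int} (h : 0 ≤ e) : 1 ≤ pvPow3 e := by
  unfold pvPow3
  rw [if_neg (not_lt.mpr h)]
  exact one_le_pow₀ (by decide)

theorem pvPow3_succ {e : Int} (h : 0 ≤ e) : pvPow3 (e + 1) = 3 * pvPow3 e := by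
  unfold pvPow3
  rw [if_neg (not_lt.mpr (le_trans h (le_of_lt (lt_add_one e)))), if_neg (not_lt.mpr h)]
  rw [Int.toNat_add h (by decide), Int.toNat_one, pow_succ, mul_comm]

theorem pvPow3_mono {a b : Int} (h : a ≤ b) : pvPow3 a ≤ pvPow3 b := by
  unfold pvPow3
  by_cases hb : b < 0
  · rw [if_pos (lt_of_le_of_lt h hb), if_pos hb]
  · rw [if_neg hb]
    by_cases ha : a < 0
    · rw [if_pos ha]
      exact pow_nonneg (by decide) _
    · rw [if_neg ha]
      exact pow_le_pow_right₀ (by decide) (Int.toNat_le_toNat h)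


-- small hand-written termination lemmas (cited from decreasing_by; kept free of omega
-- so the compiled termination proofs stay small)
theorem pvA_dec (n nextPower : Int) (_hn : ¬ n < 1) (hgt : ¬ pvPow3 (nextPower + 1) > n) :
    (-(nextPower + 1)).toNat + (n + 1 - pvPow3 (nextPower + 1 + 1)).toNat <
      (-nextPower).toNat + (n + 1 - pvPow3 (nextPower + 1)).toNat := by
  have hle : pvPow3 (nextPower + 1) ≤ n := not_lt.mp hgt
  by_cases hp : 0 ≤ nextPower + 1
  · have hpos : 0 < pvPow3 (nextPower + 1) := lt_of_lt_of_le (by decide) (pvPow3_one_le hp)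
    have hstep : pvPow3 (nextPower + 1) < pvPow3 (nextPower + 1 + 1) := by
      rw [pvPow3_succ hp]
      exact lt_mul_left hpos (by decide)
    have hlt : (n + 1 - pvPow3 (nextPower + 1 + 1)).toNat < (n + 1 - pvPow3 (nextPower + 1)).toNat :=
      (Int.toNat_lt_toNat (Int.sub_pos.mpr (Int.lt_add_one_iff.mpr hle))).mpr
        (sub_lt_sub_left hstep (n + 1))
    have e1 : (-(nextPower + 1)).toNat = 0 := Int.toNat_eq_zero.mpr (neg_nonpos.mpr hp)
    rw [e1, Nat.zero_add]
    exact lt_of_lt_of_le hlt (Nat.le_add_left _ _)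
  · have hlt1 : (-(nextPower + 1)).toNat < (-nextPower).toNat :=
      (Int.toNat_lt_toNat (neg_pos.mpr (lt_trans (lt_add_one nextPower) (not_le.mp hp)))).mpr
        (neg_lt_neg (lt_add_one nextPower))
    have hle2 : (n + 1 - pvPow3 (nextPower + 1 + 1)).toNat ≤ (n + 1 - pvPow3 (nextPower + 1)).toNat :=
      Int.toNat_le_toNat (sub_le_sub_left (pvPow3_mono (le_of_lt (lt_add_one _))) (n + 1))
    exact Nat.add_lt_add_of_lt_of_le hlt1 hle2

theorem pvB_dec (n t : Int) (h : t ≤ n ∧ 1 ≤ t) : (n + 1 - 3 * t).toNat < (n + 1 - t).toNat :=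
  (Int.toNat_lt_toNat (Int.sub_pos.mpr (Int.lt_add_one_iff.mpr h.1))).mpr
    (sub_lt_sub_left (lt_mul_left (lt_of_lt_of_le (by decide) h.2) (by decide)) (n + 1))

-- ===== PORT A =====
-- nextNumber = 3**(nextPower+1) is written inline at both of its uses
def recursion_powersof3ton (n : Int) (nextPower : Int) (newL : Option (List Int)) : Option (List Int) :=
  let l0 := newL.getD []                                  -- if newL == None: newL = []
  let l1 := if nextPower = 0 then l0 ++ [1] else l0       -- if nextPower == 0: newL.append(1)
  if n < 1 then none
  else
    if pvPow3 (nextPower + 1) > n then some l1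
    else recursion_powersof3ton n (nextPower + 1) (some (l1 ++ [pvPow3 (nextPower + 1)]))
termination_by ((-nextPower).toNat + (n + 1 - pvPow3 (nextPower + 1)).toNat)
decreasing_by
  rename_i hn hgt
  exact pvA_dec n nextPower hn hgt

-- ===== PORT B =====
-- k, t = 0, 3; while t <= n: k += 1; t *= 3   (the '1 ≤ t' guard only makes the Lean
-- loop total; at the call site t starts at 3 and only grows, so it never fires)
def pvFindK (n k t : Int) : Int :=
  if t ≤ n ∧ 1 ≤ t then pvFindK n (k + 1) (3 * t) else k
termination_by (n + 1 - t).toNat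
decreasing_by exact pvB_dec n t (by assumption)

def recursion_powersof3ton_alt (n : Int) (nextPower : Int) (newL : Option (List Int)) : Option (List Int) :=
  let l0 := newL.getD []
  let l1 := if nextPower = 0 then l0 ++ [1] else l0
  if n < 1 then none
  else
    some (l1 ++ (PySem.List.pyRange (nextPower + 1) (pvFindK n 0 3 + 1) 1).map pvPow3)

-- ===== PRECONDITION & SPEC =====
-- Pre_ excludes nextPower ≤ -2 with n ≥ 1: there Python's 3**(nextPower+1) is a float, so
-- A returns a list containing floats — not a value of the declared type list[int].
def Pre_recursion_powersof3ton (n : Int) (nextPower : Int) (newL : Option (List Int)) : Prop :=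
  n < 1 ∨ -1 ≤ nextPower
instance (n : Int) (nextPower : Int) (newL : Option (List Int)) : Decidable (Pre_recursion_powersof3ton n nextPower newL) := by unfold Pre_recursion_powersof3ton; infer_instance

def pvWitness_recursion_powersof3ton : Int × Int × Option (List Int) := (27, 0, none)

-- For n ≥ 1 and nextPower = -1, A's recursive call re-enters with nextPower = 0 and
-- unconditionally appends a second 1 (A returns e.g. some [1, 1] for n = 2), while B lists
-- each power of 3 once (some [1]); one entry per exponent is the intended output.
def D_recursion_powersof3ton (n : Int) (nextPower : Int) (newL : Option (List Int)) : Prop :=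
  1 ≤ n ∧ nextPower = -1
instance (n : Int) (nextPower : Int) (newL : Option (List Int)) : Decidable (D_recursion_powersof3ton n nextPower newL) := by unfold D_recursion_powersof3ton; infer_instance

def Spec_recursion_powersof3ton (n : Int) (nextPower : Int) (newL : Option (List Int)) (out : Option (List Int)) : Prop := ¬ D_recursion_powersof3ton n nextPower newL → out = recursion_powersof3ton_alt n nextPower newL
instance (n : Int) (nextPower : Int) (newL : Option (List Int)) (out : Option (List Int)) : Decidable (Spec_recursion_powersof3ton n nextPower newL out) := by unfold Spec_recursion_powersof3ton; infer_instance

def pvDiffWitness_recursion_powersof3ton : Int × Int × Option (List Int) := (2, -1, none)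
def pvDiffWitnessOut_recursion_powersof3ton : (Option (List Int)) × (Option (List Int)) := (some [1, 1], some [1])

-- ===== CLAIM =====
def Claim_unchanged_recursion_powersof3ton : Prop := ∀ (n : Int) (nextPower : Int) (newL : Option (List Int)), Dom_recursion_powersof3ton n nextPower newL → Pre_recursion_powersof3ton n nextPower newL → Spec_recursion_powersof3ton n nextPower newL (recursion_powersof3ton n nextPower newL)
def Claim_changed_recursion_powersof3ton : Prop := Dom_recursion_powersof3ton (pvDiffWitness_recursion_powersof3ton.1) (pvDiffWitness_recursion_powersof3ton.2.1) (pvDiffWitness_recursion_powersof3ton.2.2) ∧ Pre_recursion_powersof3ton (pvDiffWitness_recursion_powersof3ton.1) (pvDiffWitness_recursion_powersof3ton.2.1) (pvDiffWitness_recursion_powersof3ton.2.2) ∧ D_recursion_powersof3ton (pvDiffWitness_recursion_powersof3ton.1) (pvDiffWitness_recursion_powersof3ton.2.1) (pvDiffWitness_recursion_powersof3ton.2.2) ∧ recursion_powersof3ton (pvDiffWitness_recursion_powersof3ton.1) (pvDiffWitness_recursion_powersof3ton.2.1) (pvDiffWitness_recursion_powersof3ton.2.2) = pvDiffWitnessOut_recursion_powersof3ton.1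 ∧ recursion_powersof3ton_alt (pvDiffWitness_recursion_powersof3ton.1) (pvDiffWitness_recursion_powersof3ton.2.1) (pvDiffWitness_recursion_powersof3ton.2.2) = pvDiffWitnessOut_recursion_powersof3ton.2 ∧ pvDiffWitnessOut_recursion_powersof3ton.1 ≠ pvDiffWitnessOut_recursion_powersof3ton.2
def Claim_exact_recursion_powersof3ton : Prop := ∀ (n : Int) (nextPower : Int) (newL : Option (List Int)), Dom_recursion_powersof3ton n nextPower newL → Pre_recursion_powersof3ton n nextPower newL → D_recursion_powersof3ton n nextPower newL → recursion_powersof3ton n nextPower newL ≠ recursion_powersof3ton_alt n nextPower newL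

-- ===== LEMMAS AND PROOFS =====

theorem pvFindK_spec (n : Int) (hn : 1 ≤ n) : ∀ (m : ℕ) (k t : Int), (n + 1 - t).toNat = m → 0 ≤ k → t = pvPow3 (k + 1) → pvPow3 k ≤ n →
    pvPow3 (pvFindK n k t) ≤ n ∧ n < pvPow3 (pvFindK n k t + 1) ∧ 0 ≤ pvFindK n k t := by
  intro m
  induction m using Nat.strong_induction_on with
  | _ m ih =>
    intro k t hm hk ht hle
    have ht1 : 1 ≤ t := ht ▸ pvPow3_one_le (by omega)
    rw [pvFindK]
    by_cases hg : t ≤ n ∧ 1 ≤ t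
    · rw [if_pos hg]
      have h1 : 3 * t = pvPow3 (k + 1 + 1) := by rw [pvPow3_succ (by omega), ht]
      exact ih (n + 1 - 3 * t).toNat (by omega) (k + 1) (3 * t) rfl (by omega) h1
        (by rw [← ht]; exact hg.1)
    · rw [if_neg hg]
      exact ⟨hle, by rw [← ht]; omega, hk⟩

theorem pvFindK_bracket (n : Int) (hn : 1 ≤ n) :
    pvPow3 (pvFindK n 0 3) ≤ n ∧ n < pvPow3 (pvFindK n 0 3 + 1) ∧ 0 ≤ pvFindK n 0 3 :=
  pvFindK_spec n hn (n + 1 - 3).toNat 0 3 rfl (by omega)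
    (by norm_num [pvPow3]) (by norm_num [pvPow3]; omega)

theorem pyRange_one_nil {a b : Int} (h : b ≤ a) : PySem.List.pyRange a b 1 = [] := by
  rw [PySem.List.pyRange_one]
  have : (b - a).toNat = 0 := by omega
  simp [this]

theorem core (n : Int) (hn : 1 ≤ n) : ∀ (m : ℕ) (p : Int) (newL : Option (List Int)),
    (n + 1 - pvPow3 (p + 1)).toNat = m → 0 ≤ p →
    recursion_powersof3ton n p newL = recursion_powersof3ton_alt n p newL := by
  obtain ⟨hK1, hK2, hK0⟩ := pvFindK_bracket n hn
  intro m
  induction m using Nat.strong_induction_on with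
  | _ m ih =>
    intro p newL hm hp
    rw [recursion_powersof3ton]
    unfold recursion_powersof3ton_alt
    rw [if_neg (by omega : ¬ n < 1), if_neg (by omega : ¬ n < 1)]
    by_cases hgt : pvPow3 (p + 1) > n
    · rw [if_pos hgt]
      have hKp : pvFindK n 0 3 ≤ p := by
        by_contra hc
        exact absurd (le_trans (pvPow3_mono (by omega : p + 1 ≤ pvFindK n 0 3)) hK1) (by omega)
      rw [pyRange_one_nil (by omega)]
      simp
    · rw [if_neg hgt]
      have hpK : p + 1 ≤ pvFindK n 0 3 := by
        by_contra hc
        exact absurd (le_trans (pvPow3_mono (by omega : pvFindK n 0 3 + 1 ≤ p + 1)) (by omega : pvPow3 (p + 1) ≤ n)) (by omega)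
      have hdec : (n + 1 - pvPow3 (p + 1 + 1)).toNat < m := by
        have h2 := pvPow3_succ (e := p + 1) (by omega)
        have h3 := pvPow3_one_le (e := p + 1) (by omega)
        omega
      rw [ih _ hdec (p + 1) _ rfl (by omega)]
      unfold recursion_powersof3ton_alt
      rw [if_neg (by omega : ¬ n < 1)]
      rw [PySem.List.pyRange_one_cons (by omega : p + 1 < pvFindK n 0 3 + 1)]
      simp only [List.map_cons]
      rw [if_neg (by omega : ¬ p + 1 = 0)]
      simp

theorem recursion_powersof3ton_minus_one (n : Int) (hn : 1 ≤ n) (newL : Option (List Int)) :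
    recursion_powersof3ton n (-1) newL =
      some ((newL.getD [] ++ [1] ++ [1]) ++
        (PySem.List.pyRange 1 (pvFindK n 0 3 + 1) 1).map pvPow3) := by
  rw [recursion_powersof3ton]
  have h0 : pvPow3 (-1 + 1) = 1 := by norm_num [pvPow3]
  rw [if_neg (by omega : ¬ n < 1)]
  rw [if_neg (by norm_num : ¬ (-1 : Int) = 0)]
  rw [h0, if_neg (by omega : ¬ (1 : Int) > n)]
  rw [(by norm_num : (-1 : Int) + 1 = 0)]
  rw [core n hn (n + 1 - pvPow3 (0 + 1)).toNat 0 _ rfl le_rfl]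
  unfold recursion_powersof3ton_alt
  rw [if_neg (by omega : ¬ n < 1)]
  simp

-- ===== VERDICT =====
theorem recursion_powersof3ton_spec : Claim_unchanged_recursion_powersof3ton := by
  intro n p newL _ hpre hnd
  by_cases hn : n < 1
  · rw [recursion_powersof3ton]
    unfold recursion_powersof3ton_alt
    simp [hn]
  · have hp : 0 ≤ p := by
      unfold Pre_recursion_powersof3ton at hpre
      unfold D_recursion_powersof3ton at hnd
      rcases hpre with h | h
      · omega
      · by_contra hc
        exact hnd ⟨by omega, by omega⟩
    exact core n (by omega) (n + 1 - pvPow3 (p + 1)).toNat p newL rfl hp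

theorem pvFindK_two : pvFindK 2 0 3 = 0 := by
  rw [pvFindK]; norm_num

theorem recursion_powersof3ton_changed : Claim_changed_recursion_powersof3ton := by
  unfold Claim_changed_recursion_powersof3ton
  refine ⟨by decide, by decide, by decide, ?_, ?_, by decide⟩
  · show recursion_powersof3ton 2 (-1) none = some [1, 1]
    rw [recursion_powersof3ton_minus_one 2 (by norm_num) none]
    rw [pvFindK_two, pyRange_one_nil (by norm_num)]
    simp
  · show recursion_powersof3ton_alt 2 (-1) none = some [1]
    unfold recursion_powersof3ton_alt
    rw [if_neg (by norm_num : ¬ (2 : Int) < 1), if_neg (by norm_num : ¬ (-1 : Int) = 0)]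
    rw [pvFindK_two, (by norm_num : (-1 : Int) + 1 = 0)]
    rw [PySem.List.pyRange_one_cons (by norm_num : (0 : Int) < 0 + 1)]
    rw [pyRange_one_nil (by norm_num)]
    norm_num [pvPow3]

theorem recursion_powersof3ton_tight : Claim_exact_recursion_powersof3ton := by
  intro n p newL _ _ hd
  obtain ⟨hn, hp⟩ := hd
  subst hp
  rw [recursion_powersof3ton_minus_one n hn newL]
  unfold recursion_powersof3ton_alt
  rw [if_neg (by omega : ¬ n < 1)]
  rw [if_neg (by norm_num : ¬ (-1 : Int) = 0)]
  have hK0 : 0 ≤ pvFindK n 0 3 := (pvFindK_bracket n hn).2.2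
  rw [(by norm_num : (-1 : Int) + 1 = 0)]
  rw [PySem.List.pyRange_one_cons (by omega : (0 : Int) < pvFindK n 0 3 + 1)]
  intro h
  have h2 := Option.some.inj h
  have h3 := congrArg List.length h2
  simp at h3
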